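-- pv_equiv track=rewrite | github.com/divya-gh/python-challenge | PyBank/main.py | profit_date_amount
-- ===== SOURCE A (Python) =====
-- def profit_date_amount(dates , p_l_change):
--     #initialize the dictionary
--     date_and_amount={}
--     for key in dates:
--         #Assign value "0" to the first date
--         if key == 'Jan-2010':
--             date_and_amount[key] = 0
--         else:
--             for value in p_l_change:
--                 #Assign difference values to each date
--                 date_and_amount[key] = value
--                 #remove previous value avoid re-assignment
--                 p_l_change.remove(value)
--                 break
--     return date_and_amount
-- ===== SOURCE B (Python) =====
-- def profit_date_amount(dates, p_l_change):
--     # Index pointer into p_l_change instead of repeated list.remove.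
--     # Note: unlike A, B does not mutate p_l_change; return value is the same.
--     date_and_amount = {}
--     i = 0
--     n = len(p_l_change)
--     for key in dates:
--         if key == 'Jan-2010':
--             date_and_amount[key] = 0
--         elif i < n:
--             date_and_amount[key] = p_l_change[i]
--             i += 1
--     return date_and_amount
-- ===== Notes on version B (the rewrite author's own statement) =====
-- stated objective: faster
-- what changed: Replaces the inner for-loop with break plus list.remove (which shifts the whole list each time) by a single index pointer advancing through p_l_change; B also no longer mutates p_l_change.
import Mathlib
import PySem

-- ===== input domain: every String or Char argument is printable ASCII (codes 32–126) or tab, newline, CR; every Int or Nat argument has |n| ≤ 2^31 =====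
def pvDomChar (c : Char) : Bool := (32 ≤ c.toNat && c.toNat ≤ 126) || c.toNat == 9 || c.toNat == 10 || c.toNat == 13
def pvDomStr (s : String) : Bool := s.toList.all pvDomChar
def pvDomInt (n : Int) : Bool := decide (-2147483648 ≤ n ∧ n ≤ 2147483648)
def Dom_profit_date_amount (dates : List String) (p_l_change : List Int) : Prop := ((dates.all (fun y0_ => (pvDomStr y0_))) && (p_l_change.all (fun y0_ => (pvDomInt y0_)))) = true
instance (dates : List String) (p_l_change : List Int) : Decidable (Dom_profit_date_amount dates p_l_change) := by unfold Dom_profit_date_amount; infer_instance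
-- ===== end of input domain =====

-- ===== PORT A =====
-- B is an index-pointer re-implementation of A's remove-and-break loop; A mutates p_l_change in Python, B does not (return value only is compared).
def pvStepA (st : PySem.Dict String Int × List Int) (key : String) : PySem.Dict String Int × List Int :=
  if key == "Jan-2010" then (st.1.insert key 0, st.2)
  else
    match st.2 with
    | [] => st                                   -- inner for-loop over empty list: no iteration
    | v :: _ =>                                  -- first iteration, then break
      (st.1.insert key v, ((PySem.List.remove? st.2 v).getD st.2))

def profit_date_amount (dates : List String) (p_l_change : List Int) : List (String × Int) :=
  (dates.foldl pvStepA (PySem.Dict.empty, p_l_change)).1.items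

-- ===== PORT B =====
def pvStepB (p_l_change : List Int) (n : Nat) (st : PySem.Dict String Int × Nat) (key : String) : PySem.Dict String Int × Nat :=
  if key == "Jan-2010" then (st.1.insert key 0, st.2)
  else if st.2 < n then (st.1.insert key (p_l_change.getD st.2 0), st.2 + 1)
  else st

def profit_date_amount_alt (dates : List String) (p_l_change : List Int) : List (String × Int) :=
  (dates.foldl (pvStepB p_l_change p_l_change.length) (PySem.Dict.empty, 0)).1.items

-- ===== PRECONDITION & SPEC =====
def Spec_profit_date_amount (dates : List String) (p_l_change : List Int) (out : List (String × Int)) : Prop := out = profit_date_amount_alt dates p_l_change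
instance (dates : List String) (p_l_change : List Int) (out : List (String × Int)) : Decidable (Spec_profit_date_amount dates p_l_change out) := by unfold Spec_profit_date_amount; infer_instance

-- ===== CLAIM (what is proved, stated in full; the proofs are below) =====
def Claim_equal_profit_date_amount : Prop := ∀ (dates : List String) (p_l_change : List Int), Dom_profit_date_amount dates p_l_change → Spec_profit_date_amount dates p_l_change (profit_date_amount dates p_l_change)

-- ===== LEMMAS AND PROOFS =====
theorem pv_fold_eq (p_l : List Int) (dates : List String) :
    ∀ (d : PySem.Dict String Int) (i : Nat),
      (dates.foldl pvStepA (d, p_l.drop i)).1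
        = (dates.foldl (pvStepB p_l p_l.length) (d, i)).1 := by
  induction dates with
  | nil => intro d i; simp
  | cons key rest ih =>
    intro d i
    by_cases hk : key == "Jan-2010"
    · simp [List.foldl_cons, pvStepA, pvStepB, hk, ih]
    · cases h : p_l.drop i with
      | nil =>
        have hlen : p_l.length ≤ i := by
          have := congrArg List.length h
          simp at this; omega
        simp [List.foldl_cons, pvStepA, pvStepB, hk, Nat.not_lt.mpr hlen]
        exact h ▸ ih d i
      | cons v vs =>
        have hlt : i < p_l.length := by
          have := congrArg List.length h
          simp at this; omega
        have hv : p_l[i] = v := by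
          have h0 : p_l[i + 0]? = some v := by
            rw [← List.getElem?_drop, h]; rfl
          simp [List.getElem?_eq_getElem hlt] at h0
          simpa using h0
        have hdrop : p_l.drop (i + 1) = vs := by
          have h1 : (p_l.drop i).drop 1 = p_l.drop (i + 1) := by
            rw [List.drop_drop]
          rw [← h1, h]; rfl
        simp [List.foldl_cons, pvStepA, pvStepB, hk, hlt, hv]
        exact hdrop ▸ ih (d.insert key v) (i + 1)

-- ===== VERDICT (by name: the statement is the Claim_ definition above) =====
theorem profit_date_amount_spec : Claim_equal_profit_date_amount := by
  intro dates p_l _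
  unfold Spec_profit_date_amount profit_date_amount profit_date_amount_alt
  have := pv_fold_eq p_l dates PySem.Dict.empty 0
  simp at this
  rw [this]
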